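-- pv_equiv track=rewrite | github.com/amcerri/apllos-generativeai-challenge | app/agents/analytics/planner.py | _find_time_column
-- ===== SOURCE A (Python) =====
-- _TIME_HINTS = ("timestamp", "date", "data", "dt")
--
-- def _find_time_column(columns: list[str]) -> str | None:
--     """Find a plausible timestamp/date column from a list of columns."""
--     lwcols = [c.lower() for c in columns]
--     # Extended hints include common business date fields
--     extended_hints = list(_TIME_HINTS) + [
--         "created", "updated", "purchase", "approved", "delivered", "estimated",
--     ]
--     for hint in extended_hints:
--         for c in lwcols:
--             if hint in c:
--                 # return original‑case column
--                 return columns[lwcols.index(c)]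
--     return None
-- ===== SOURCE B (Python) =====
-- _TIME_HINTS = ("timestamp", "date", "data", "dt")
--
-- def _find_time_column(columns):
--     """Find a plausible timestamp/date column from a list of columns."""
--     hints = list(_TIME_HINTS) + [
--         "created", "updated", "purchase", "approved", "delivered", "estimated",
--     ]
--     n = len(hints)
--     best_rank = n
--     best = None
--     for c in columns:
--         lc = c.lower()
--         r = next((i for i, h in enumerate(hints) if h in lc), n)
--         if r < best_rank:
--             best_rank = r
--             best = c
--     return best
-- ===== Notes on version B (the rewrite author's own statement) =====
-- stated objective: alternative
-- what changed: Replaced A's hint-outer double scan (for each hint, scan all lowered columns, then a list.index pass to recover the original column) by a single pass over the columns that ranks each column by the index of the first hint it contains and keeps the earliest best-ranked column.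
import Mathlib
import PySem

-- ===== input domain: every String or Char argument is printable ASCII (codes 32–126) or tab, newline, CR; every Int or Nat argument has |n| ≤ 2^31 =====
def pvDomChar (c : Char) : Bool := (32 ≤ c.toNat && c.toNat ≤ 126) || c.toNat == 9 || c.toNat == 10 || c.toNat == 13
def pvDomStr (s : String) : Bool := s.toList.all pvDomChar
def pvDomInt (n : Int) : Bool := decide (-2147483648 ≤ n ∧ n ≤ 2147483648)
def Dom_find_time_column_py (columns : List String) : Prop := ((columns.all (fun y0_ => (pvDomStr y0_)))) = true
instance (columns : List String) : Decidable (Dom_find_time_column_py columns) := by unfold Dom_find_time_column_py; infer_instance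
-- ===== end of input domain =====

-- B replaces A's hint-outer/column-outer double scan by a single pass over the
-- columns that ranks each column by the index of the first hint it contains and
-- keeps the best-ranked (earliest) column; objective: alternative decomposition.

-- ===== PORT A =====
-- module constant _TIME_HINTS ++ the extended business hints, as A builds them
def pvHints : List String :=
  ["timestamp", "date", "data", "dt"] ++
  ["created", "updated", "purchase", "approved", "delivered", "estimated"]

-- inner loop of A: first lowered column containing `hint`
def pvAInner (hint : String) : List String → Option String
  | [] => none
  | c :: rest => if PySem.Str.isIn hint c then some c else pvAInner hint rest

-- outer loop of A over the hints; on a match return columns[lwcols.index(c)]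
def pvAOuter (columns lwcols : List String) : List String → Option String
  | [] => none
  | hint :: rest =>
    match pvAInner hint lwcols with
    | some c => (PySem.List.index? lwcols c).bind (fun i => PySem.List.pyGet? columns (i : Int))
    | none => pvAOuter columns lwcols rest

def find_time_column_py (columns : List String) : Option String :=
  let lwcols := columns.map PySem.Str.lower
  pvAOuter columns lwcols pvHints

-- ===== PORT B =====
def find_time_column_py_alt (columns : List String) : Option String :=
  let n := pvHints.length
  (columns.foldl
    (fun st c =>
      let lc := PySem.Str.lower c
      let r := pvHints.findIdx (fun h => PySem.Str.isIn h lc)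
      if r < st.1 then (r, some c) else st)
    (n, (none : Option String))).2

-- ===== PRECONDITION & SPEC =====
def Spec_find_time_column_py (columns : List String) (out : Option String) : Prop := out = find_time_column_py_alt columns
instance (columns : List String) (out : Option String) : Decidable (Spec_find_time_column_py columns out) := by unfold Spec_find_time_column_py; infer_instance

-- ===== CLAIM (what is proved, stated in full; the proofs are below) =====
def Claim_equal_find_time_column_py : Prop := ∀ (columns : List String), Dom_find_time_column_py columns → Spec_find_time_column_py columns (find_time_column_py columns)

-- ===== LEMMAS AND PROOFS =====

-- common reference: first hint, in order, that some column matches; first such column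
def pvRef (cols : List String) : List String → Option String
  | [] => none
  | h :: t =>
    match cols.find? (fun c => PySem.Str.isIn h (PySem.Str.lower c)) with
    | some c => some c
    | none => pvRef cols t

def pvRank (hs : List String) (c : String) : Nat :=
  hs.findIdx (fun h => PySem.Str.isIn h (PySem.Str.lower c))

def pvStep (f : String → Nat) (st : Nat × Option String) (c : String) : Nat × Option String :=
  if f c < st.1 then (f c, some c) else st

theorem pvAInner_eq_find? (hint : String) (l : List String) :
    pvAInner hint l = l.find? (fun c => PySem.Str.isIn hint c) := by
  induction l with
  | nil => rfl
  | cons c rest ih =>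
    simp only [pvAInner]
    by_cases h : PySem.Str.isIn hint c
    · rw [if_pos h, List.find?_cons_of_pos h]
    · rw [if_neg h, List.find?_cons_of_neg h]
      exact ih

theorem pvIdx_retrieval (p : String → Bool) (cols : List String) :
    ((cols.map PySem.Str.lower).find? p).bind
      (fun c => (PySem.List.index? (cols.map PySem.Str.lower) c).bind
        (fun i => PySem.List.pyGet? cols (i : Int)))
    = cols.find? (fun c => p (PySem.Str.lower c)) := by
  induction cols with
  | nil => rfl
  | cons c cs ih =>
    simp only [List.map_cons]
    by_cases h : p (PySem.Str.lower c)
    · rw [List.find?_cons_of_pos (p := fun c => p (PySem.Str.lower c)) (l := cs) h]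
      rw [List.find?_cons_of_pos (p := p) h]
      rw [Option.bind_some, PySem.List.index?_cons_self, Option.bind_some]
      simp
    · rw [List.find?_cons_of_neg (p := fun c => p (PySem.Str.lower c)) (l := cs) h]
      rw [List.find?_cons_of_neg (p := p) h, ← ih]
      cases hf : (cs.map PySem.Str.lower).find? p with
      | none => simp
      | some v =>
        have hvne : PySem.Str.lower c ≠ v := by
          intro he; rw [← he] at hf
          have := List.find?_some hf
          simp [h] at this
        rw [Option.bind_some, Option.bind_some,
          PySem.List.index?_cons_of_ne _ hvne]
        cases hidx : PySem.List.index? (cs.map PySem.Str.lower) v with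
        | none => simp
        | some k =>
          simp only [Option.map_some, Option.bind_some]
          have hc : ((k + 1 : Nat) : Int) = ((k : Nat) : Int) + 1 := by push_cast; ring
          rw [hc, PySem.List.pyGet?_cons_succ]

theorem pvA_eq_ref (hs cols : List String) :
    pvAOuter cols (cols.map PySem.Str.lower) hs = pvRef cols hs := by
  induction hs with
  | nil => rfl
  | cons h t ih =>
    simp only [pvAOuter, pvRef, pvAInner_eq_find?]
    have hret := pvIdx_retrieval (fun c => PySem.Str.isIn h c) cols
    cases hf : (cols.map PySem.Str.lower).find? (fun c => PySem.Str.isIn h c) with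
    | none =>
      rw [hf, Option.bind_none] at hret
      rw [← hret]
      exact ih
    | some c =>
      rw [hf, Option.bind_some] at hret
      dsimp only
      -- the bind is some: c occurs in the lowered columns, so index & get succeed
      have hc : c ∈ cols.map PySem.Str.lower := List.mem_of_find?_eq_some hf
      obtain ⟨k, hk⟩ : ∃ k, PySem.List.index? (cols.map PySem.Str.lower) c = some k := by
        rcases hcase : PySem.List.index? (cols.map PySem.Str.lower) c with _ | k
        · rw [PySem.List.index?_eq_none_iff] at hcase; exact absurd hc hcase
        · exact ⟨k, rfl⟩
      obtain ⟨hklt, -⟩ := PySem.List.getElem_of_index?_eq_some hk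
      rw [hk, Option.bind_some] at hret ⊢
      have hkc : k < cols.length := by simpa using hklt
      have hget : PySem.List.pyGet? cols (k : Int) = some cols[k] := by
        rw [PySem.List.pyGet?_natCast]
        exact List.getElem?_eq_getElem hkc
      rw [hget] at hret ⊢
      rw [← hret]

theorem pvFold_frozen (f : String → Nat) (cols : List String) (st : Nat × Option String)
    (h : st.1 = 0) : cols.foldl (pvStep f) st = st := by
  induction cols with
  | nil => rfl
  | cons c cs ih =>
    simp only [List.foldl_cons, pvStep, h]
    simp [ih]

theorem pvFold_zero (f : String → Nat) (cols : List String) (c : String) :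
    ∀ st : Nat × Option String, 1 ≤ st.1 →
    cols.find? (fun x => f x == 0) = some c →
    (cols.foldl (pvStep f) st).2 = some c := by
  induction cols with
  | nil => intro st _ hfind; simp at hfind
  | cons x cs ih =>
    intro st hst hfind
    by_cases hx : f x = 0
    · have hxc : x = c := Option.some.inj
        (by rwa [List.find?_cons_of_pos (by simp [hx])] at hfind)
      subst hxc
      simp only [List.foldl_cons, pvStep, hx]
      rw [if_pos (by omega)]
      rw [pvFold_frozen f cs (0, some x) rfl]
    · rw [List.find?_cons_of_neg (by simp [hx])] at hfind
      simp only [List.foldl_cons, pvStep]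
      by_cases hlt : f x < st.1
      · rw [if_pos hlt]
        exact ih (f x, some x) (by show 1 ≤ f x; omega) hfind
      · rw [if_neg hlt]
        exact ih st hst hfind

theorem pvFold_shift (f g : String → Nat) (cols : List String) :
    ∀ st : Nat × Option String, (∀ x ∈ cols, g x = f x + 1) →
    cols.foldl (pvStep g) (st.1 + 1, st.2) =
      ((cols.foldl (pvStep f) st).1 + 1, (cols.foldl (pvStep f) st).2) := by
  induction cols with
  | nil => intro st _; rfl
  | cons x cs ih =>
    intro st hall
    have hx : g x = f x + 1 := hall x (List.mem_cons_self ..)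
    have htail : ∀ y ∈ cs, g y = f y + 1 := fun y hy => hall y (List.mem_cons_of_mem _ hy)
    simp only [List.foldl_cons, pvStep, hx]
    by_cases hlt : f x < st.1
    · rw [if_pos (by omega), if_pos hlt]
      exact ih (f x, some x) htail
    · rw [if_neg (by omega), if_neg hlt]
      exact ih st htail

theorem pvFind?_congr {α : Type} (p q : α → Bool) (l : List α)
    (h : ∀ x ∈ l, p x = q x) : l.find? p = l.find? q := by
  induction l with
  | nil => rfl
  | cons x xs ih =>
    have ih' := ih (fun y hy => h y (List.mem_cons_of_mem _ hy))
    cases hq : q x with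
    | true =>
      rw [List.find?_cons_of_pos hq, List.find?_cons_of_pos (by rw [h x (List.mem_cons_self ..), hq])]
    | false =>
      rw [List.find?_cons_of_neg (by simp [h x (List.mem_cons_self ..), hq]),
        List.find?_cons_of_neg (by simp [hq])]
      exact ih'

theorem pvB_eq_ref (hs cols : List String) :
    (cols.foldl (pvStep (pvRank hs)) (hs.length, (none : Option String))).2 = pvRef cols hs := by
  induction hs with
  | nil =>
    rw [pvFold_frozen _ _ _ rfl]
    rfl
  | cons h t ih =>
    simp only [pvRef]
    cases hf : cols.find? (fun c => PySem.Str.isIn h (PySem.Str.lower c)) with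
    | some c =>
      apply pvFold_zero (pvRank (h :: t)) cols c _ (by simp)
      rw [← hf]
      apply pvFind?_congr
      intro x _
      cases hm : PySem.Str.isIn h (PySem.Str.lower x) with
      | true =>
        rw [pvRank, List.findIdx_cons, hm]
        rfl
      | false =>
        rw [pvRank, List.findIdx_cons, hm]
        simp
    | none =>
      have hall : ∀ x ∈ cols, pvRank (h :: t) x = pvRank t x + 1 := by
        intro x hx
        have hm : PySem.Str.isIn h (PySem.Str.lower x) = false :=
          Bool.eq_false_iff.mpr (List.find?_eq_none.mp hf x hx)
        rw [pvRank, pvRank, List.findIdx_cons, hm]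
        rfl
      have hsh := pvFold_shift (pvRank t) (pvRank (h :: t)) cols (t.length, none) hall
      simp only [List.length_cons]
      rw [hsh, ih]

-- ===== VERDICT (by name: the statement is the Claim_ definition above) =====
theorem find_time_column_py_spec : Claim_equal_find_time_column_py := by
  intro columns _
  show find_time_column_py columns = find_time_column_py_alt columns
  have hb : find_time_column_py_alt columns =
      (columns.foldl (pvStep (pvRank pvHints)) (pvHints.length, (none : Option String))).2 := rfl
  rw [hb, pvB_eq_ref]
  exact pvA_eq_ref pvHints columns
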